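-- pv_equiv track=rewrite | github.com/Patxi91/CodeWars_Cloud | 3kyu-Alphabetic Anagrams-Oscar.py | istPosition
-- ===== SOURCE A (Python) =====
-- from collections import Counter
--
-- def istPosition(word):
--     l, r, s = len(word), 1, 1
--     c = Counter()
--
--     for i in range(l):
--         x = word[(l - 1) - i]
--         c[x] += 1
--         for y in c:
--             if (y < x):
--                 r += s * c[y] // c[x]
--         s = s * (i + 1) // c[x]
--     return r
-- ===== SOURCE B (Python) =====
-- from collections import Counter
--
-- def _factorial(n):
--     f = 1
--     for k in range(2, n + 1):
--         f *= k
--     return f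
--
-- def istPosition(word):
--     n = len(word)
--     counts = Counter(word)
--     denom = 1
--     for v in counts.values():
--         denom *= _factorial(v)
--     p = _factorial(n) // denom      # distinct arrangements of the remaining letters
--     rank = 1
--     rem = n
--     for x in word:
--         for y in counts:
--             if y < x and counts[y] > 0:
--                 rank += p * counts[y] // rem     # arrangements starting with y at this position
--         p = p * counts[x] // rem
--         rem -= 1
--         counts[x] -= 1
--     return rank
-- ===== Notes on version B (the rewrite author's own statement) =====
-- stated objective: alternative
-- what changed: A scans the word right-to-left, growing a Counter and maintaining the suffix arrangement count via s = s*(i+1)//c[x]; B scans left-to-right over a Counter of the remaining letters initialised with an explicit factorial quotient, adding p*counts[y]//rem for each smaller available letter and shrinking p by p*counts[x]//rem.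
import Mathlib
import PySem

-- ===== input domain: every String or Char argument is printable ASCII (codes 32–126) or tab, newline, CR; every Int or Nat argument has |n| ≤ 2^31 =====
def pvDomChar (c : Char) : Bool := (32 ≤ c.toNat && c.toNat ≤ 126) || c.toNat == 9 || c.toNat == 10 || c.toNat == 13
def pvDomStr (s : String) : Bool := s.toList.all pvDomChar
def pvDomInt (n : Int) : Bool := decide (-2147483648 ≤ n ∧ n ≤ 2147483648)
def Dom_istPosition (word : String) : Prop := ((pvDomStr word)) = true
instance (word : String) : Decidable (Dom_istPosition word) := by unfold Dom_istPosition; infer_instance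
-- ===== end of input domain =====

-- B replaces A's reversed scan (Counter grown right-to-left, suffix arrangement count via s*(i+1)//c[x])
-- by a forward scan over a Counter of the remaining letters: p, initialised as an explicit factorial
-- quotient, is the arrangement count of the rest, and each smaller available letter contributes
-- p*counts[y]//rem (objective: alternative; same exact rank, same cost).

-- ===== PORT A =====
def istPosition (word : String) : Int :=
  let cs := word.toList
  let l : Int := (cs.length : Int)
  let st :=
    (PySem.List.pyRange 0 l).foldl
      (fun (st : Int × Int × PySem.Dict Char Int) i =>
        let r := st.1; let s := st.2.1; let c := st.2.2
        match PySem.List.pyGet? cs ((l - 1) - i) with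
        | none => (r, s, c)
        | some x =>
          let c := c.modify x 0 (· + 1)
          let r := c.keys.foldl
            (fun r y => if y < x then r + PySem.Int.floordiv (s * c.getD y 0) (c.getD x 0) else r) r
          let s := PySem.Int.floordiv (s * (i + 1)) (c.getD x 0)
          (r, s, c))
      (1, 1, PySem.Dict.empty)
  st.1

-- ===== PORT B =====
def pyFactorial (n : Int) : Int :=
  (PySem.List.pyRange 2 (n + 1)).foldl (fun f k => f * k) 1

def istPosition_alt (word : String) : Int :=
  let n : Int := (word.toList.length : Int)
  let counts := PySem.Dict.counter word.toList
  let denom := counts.values.foldl (fun denom v => denom * pyFactorial v) 1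
  let p := PySem.Int.floordiv (pyFactorial n) denom
  let st := word.toList.foldl
    (fun (st : Int × Int × Int × PySem.Dict Char Int) x =>
      let rank := st.1; let p := st.2.1; let rem := st.2.2.1; let counts := st.2.2.2
      let rank := counts.keys.foldl
        (fun rank y =>
          if y < x ∧ 0 < counts.getD y 0 then
            rank + PySem.Int.floordiv (p * counts.getD y 0) rem
          else rank) rank
      let p := PySem.Int.floordiv (p * counts.getD x 0) rem
      (rank, p, rem - 1, counts.modify x 0 (· - 1)))
    (1, p, n, counts)
  st.1

-- ===== PRECONDITION & SPEC =====
def Spec_istPosition (word : String) (out : Int) : Prop := out = istPosition_alt word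
instance (word : String) (out : Int) : Decidable (Spec_istPosition word out) := by unfold Spec_istPosition; infer_instance

-- ===== CLAIM (what is proved, stated in full; the proofs are below) =====
def Claim_equal_istPosition : Prop := ∀ (word : String), Dom_istPosition word → Spec_istPosition word (istPosition word)

-- ===== LEMMAS AND PROOFS =====

-- Number of distinct permutations of the multiset of letters of v (mPerm), and its factorial denominator (mDen).
def mDen (v : List Char) : ℕ := ∏ z ∈ v.toFinset, Nat.factorial (v.count z)
def mPerm (v : List Char) : ℕ := Nat.multinomial v.toFinset v.count

theorem mDen_pos (v : List Char) : 0 < mDen v := by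
  unfold mDen; exact Finset.prod_pos fun z _ => Nat.factorial_pos _

theorem mSpec (v : List Char) : mDen v * mPerm v = Nat.factorial v.length := by
  unfold mDen mPerm
  rw [Nat.multinomial_spec, List.sum_toFinset_count_eq_length]

theorem mDen_cons (x : Char) (v : List Char) : mDen (x :: v) = (v.count x + 1) * mDen v := by
  unfold mDen
  rw [List.toFinset_cons]
  by_cases hx : x ∈ v.toFinset
  · rw [Finset.insert_eq_self.mpr hx]
    rw [← Finset.mul_prod_erase _ _ hx, ← Finset.mul_prod_erase _ (fun z => Nat.factorial (v.count z)) hx]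
    have h1 : (x :: v).count x = v.count x + 1 := by simp
    have h2 : ∏ z ∈ v.toFinset.erase x, Nat.factorial ((x :: v).count z)
        = ∏ z ∈ v.toFinset.erase x, Nat.factorial (v.count z) :=
      Finset.prod_congr rfl fun z hz => by
        simp [(Finset.ne_of_mem_erase hz).symm]
    rw [h1, h2, Nat.factorial_succ]; ring
  · rw [Finset.prod_insert hx]
    have hxv : x ∉ v := fun h => hx (List.mem_toFinset.mpr h)
    have h0 : v.count x = 0 := List.count_eq_zero.mpr hxv
    have h1 : (x :: v).count x = 1 := by simp [h0]
    have h2 : ∏ z ∈ v.toFinset, Nat.factorial ((x :: v).count z)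
        = ∏ z ∈ v.toFinset, Nat.factorial (v.count z) :=
      Finset.prod_congr rfl fun z hz => by
        have hzx : z ≠ x := by rintro rfl; exact hxv (List.mem_toFinset.mp hz)
        simp [hzx.symm]
    rw [h1, h2, h0]; simp

theorem mDen_perm {v w : List Char} (h : v.Perm w) : mDen v = mDen w := by
  unfold mDen
  rw [List.toFinset_eq_of_perm _ _ h]
  exact Finset.prod_congr rfl fun z _ => by rw [h.count_eq]

theorem mDen_erase {y : Char} {v : List Char} (h : y ∈ v) :
    mDen (v.erase y) * v.count y = mDen v := by
  have hperm : (y :: v.erase y).Perm v := (List.perm_cons_erase h).symm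
  have h1 : mDen v = ((v.erase y).count y + 1) * mDen (v.erase y) := by
    rw [← mDen_perm hperm, mDen_cons]
  have hc : (v.erase y).count y + 1 = v.count y := by
    rw [List.count_erase_self]
    have : 1 ≤ v.count y := List.one_le_count_iff.mpr h
    omega
  rw [h1, ← hc]; ring

theorem key_cons (x : Char) (t : List Char) :
    (t.count x + 1) * mPerm (x :: t) = (t.length + 1) * mPerm t := by
  have h1 := mSpec (x :: t)
  rw [mDen_cons] at h1
  have h2 := mSpec t
  have h3 : mDen t * ((t.count x + 1) * mPerm (x :: t)) = mDen t * ((t.length + 1) * mPerm t) := by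
    have : Nat.factorial (x :: t).length = (t.length + 1) * Nat.factorial t.length := by
      simp [Nat.factorial_succ]
    rw [← mul_assoc, mul_comm (mDen t) (t.count x + 1), h1, this, ← h2]; ring
  exact Nat.eq_of_mul_eq_mul_left (mDen_pos t) h3

theorem key_replace {y x : Char} {t : List Char} (hy : y ∈ t) (hne : x ≠ y) :
    (t.count x + 1) * mPerm (x :: t.erase y) = t.count y * mPerm t := by
  set e := t.erase y with he
  have hlen : e.length + 1 = t.length := by
    rw [he, List.length_erase_of_mem hy]
    have := List.length_pos_of_mem hy
    omega
  have h1 := mSpec (x :: e)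
  rw [mDen_cons] at h1
  have hcx : e.count x = t.count x := by rw [he, List.count_erase_of_ne hne]
  have hde : mDen e * t.count y = mDen t := mDen_erase hy
  have h2 := mSpec t
  have hK : 0 < mDen e * t.count y := by
    rw [hde]; exact mDen_pos t
  apply Nat.eq_of_mul_eq_mul_left hK
  have hfac : Nat.factorial (x :: e).length = Nat.factorial t.length := by
    simp [← hlen]
  calc mDen e * t.count y * ((t.count x + 1) * mPerm (x :: e))
      = t.count y * ((e.count x + 1) * mDen e * mPerm (x :: e)) := by rw [hcx]; ring
    _ = t.count y * Nat.factorial t.length := by rw [h1, hfac]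
    _ = t.count y * (mDen t * mPerm t) := by rw [h2]
    _ = mDen e * t.count y * (t.count y * mPerm t) := by rw [← hde]; ring

theorem fd_exact {a b q : ℕ} (hb : 0 < b) (h : b * q = a) :
    PySem.Int.floordiv (a : ℤ) (b : ℤ) = (q : ℤ) := by
  rw [PySem.Int.floordiv_natCast]
  subst h
  rw [Nat.mul_div_cancel_left _ hb]

theorem pyFactorial_natCast (n : ℕ) : pyFactorial (n : ℤ) = (Nat.factorial n : ℤ) := by
  induction n with
  | zero => decide
  | succ m ih =>
    cases m with
    | zero => decide
    | succ k =>
      unfold pyFactorial at ih ⊢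
      have h : ((k + 2 : ℕ) : ℤ) + 1 = (((k + 1 : ℕ) : ℤ) + 1) + 1 := by push_cast; ring
      rw [h, PySem.List.pyRange_one_succ_right (by push_cast; omega), List.foldl_append, ih]
      show (((k + 1).factorial : ℤ)) * (((k + 1 : ℕ) : ℤ) + 1) = _
      push_cast [Nat.factorial_succ]
      ring

theorem foldl_mul_map (l : List ℤ) (f : ℤ → ℤ) (a : ℤ) :
    l.foldl (fun p v => p * f v) a = a * (l.map f).prod := by
  induction l generalizing a with
  | nil => simp
  | cons v l ih => simp [ih, mul_assoc]

def gRank : List Char → Int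
  | [] => 1
  | x :: t => (∑ y ∈ (x :: t).toFinset.filter (fun y => y < x), (mPerm ((x :: t).erase y) : Int)) + gRank t

theorem foldl_ite_sum {l : List Char} (hnd : l.Nodup) (P : Char → Prop) [DecidablePred P]
    (f : Char → ℤ) (r : ℤ) :
    l.foldl (fun acc y => if P y then acc + f y else acc) r
      = r + ∑ y ∈ l.toFinset.filter P, f y := by
  rw [PySem.List.foldl_ite_eq_foldl_filter (p := P) (f := fun acc y => acc + f y)]
  rw [PySem.List.foldl_add]
  rw [← List.sum_toFinset _ (List.Nodup.filter _ hnd), List.toFinset_filter]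
  simp

theorem keyB {y : Char} {u : List Char} (hy : y ∈ u) :
    u.length * mPerm (u.erase y) = mPerm u * u.count y := by
  have hL : (u.erase y).length + 1 = u.length := by
    rw [List.length_erase_of_mem hy]
    have := List.length_pos_of_mem hy
    omega
  apply Nat.eq_of_mul_eq_mul_left (mDen_pos u)
  calc mDen u * (u.length * mPerm (u.erase y))
      = u.length * (mDen (u.erase y) * mPerm (u.erase y)) * u.count y := by
        rw [← mDen_erase hy]; ring
    _ = u.length * Nat.factorial (u.erase y).length * u.count y := by rw [mSpec]
    _ = Nat.factorial u.length * u.count y := by rw [← hL, Nat.factorial_succ]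
    _ = mDen u * (mPerm u * u.count y) := by rw [← mSpec u]; ring

-- the denominator loop over a dict holding the letter counts of m computes mDen m
theorem denom_eq (d : PySem.Dict Char Int) (m : List Char) (hnd : d.keys.Nodup)
    (hv : ∀ y, d.getD y 0 = (m.count y : ℤ)) (hcov : ∀ y ∈ m, y ∈ d.keys) :
    d.values.foldl (fun denom v => denom * pyFactorial v) 1 = ((mDen m : ℕ) : ℤ) := by
  have hvals : d.values = d.keys.map fun k => (m.count k : ℤ) := by
    rw [PySem.Dict.values_eq_map_keys d hnd 0]
    exact List.map_congr_left fun k _ => hv k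
  have hsub : m.toFinset ⊆ d.keys.toFinset := fun z hz =>
    List.mem_toFinset.mpr (hcov z (List.mem_toFinset.mp hz))
  rw [foldl_mul_map, hvals, List.map_map]
  have : ((fun v => pyFactorial v) ∘ fun k => ((m.count k : ℕ) : ℤ))
      = fun k => ((Nat.factorial (m.count k) : ℕ) : ℤ) := by
    funext k; exact pyFactorial_natCast (m.count k)
  rw [this, ← List.prod_toFinset _ hnd]
  rw [← Finset.prod_subset hsub (by
    intro z _ hz
    simp [List.count_eq_zero.mpr (fun hm => hz (List.mem_toFinset.mpr hm))])]
  rw [← Nat.cast_prod]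
  simp [mDen]

theorem B_loop (suf : List Char) : ∀ (r : ℤ) (cd : PySem.Dict Char Int),
    cd.keys.Nodup → (∀ y, cd.getD y 0 = (suf.count y : ℤ)) → (∀ y ∈ suf, y ∈ cd.keys) →
    (suf.foldl
      (fun (st : Int × Int × Int × PySem.Dict Char Int) x =>
        let rank := st.1; let p := st.2.1; let rem := st.2.2.1; let counts := st.2.2.2
        let rank := counts.keys.foldl
          (fun rank y =>
            if y < x ∧ 0 < counts.getD y 0 then
              rank + PySem.Int.floordiv (p * counts.getD y 0) rem
            else rank) rank
        let p := PySem.Int.floordiv (p * counts.getD x 0) rem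
        (rank, p, rem - 1, counts.modify x 0 (· - 1)))
      (r, (mPerm suf : ℤ), (suf.length : ℤ), cd)).1 = r + gRank suf - 1 := by
  induction suf with
  | nil => intro r cd _ _ _; simp [gRank]
  | cons x t ih =>
    intro r cd hnd hv hcov
    rw [List.foldl_cons]
    have hxm : x ∈ x :: t := List.mem_cons_self
    have hLen : ((x :: t).length : ℤ) = ((t.length + 1 : ℕ) : ℤ) := by
      push_cast [List.length_cons]; ring
    -- the inner loop adds the arrangement counts of the smaller-started words
    have hin : cd.keys.foldl
        (fun rank y =>
          if y < x ∧ 0 < cd.getD y 0 then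
            rank + PySem.Int.floordiv ((mPerm (x :: t) : ℤ) * cd.getD y 0) (((x :: t).length : ℕ) : ℤ)
          else rank) r
        = r + ∑ y ∈ (x :: t).toFinset.filter (fun y => y < x), (mPerm ((x :: t).erase y) : ℤ) := by
      rw [foldl_ite_sum hnd (fun y => y < x ∧ 0 < cd.getD y 0)
        (fun y => PySem.Int.floordiv ((mPerm (x :: t) : ℤ) * cd.getD y 0) (((x :: t).length : ℕ) : ℤ)) r]
      congr 1
      rw [Finset.sum_congr]
      · -- equal filter sets
        apply Finset.ext
        intro y
        simp only [Finset.mem_filter, List.mem_toFinset]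
        constructor
        · rintro ⟨hk, hlt, hpos⟩
          refine ⟨?_, hlt⟩
          rw [hv y] at hpos
          exact_mod_cast List.count_pos_iff.mp (by exact_mod_cast hpos)
        · rintro ⟨hm, hlt⟩
          refine ⟨hcov y hm, hlt, ?_⟩
          rw [hv y]
          exact_mod_cast List.count_pos_iff.mpr hm
      · -- equal terms on the set
        intro y hy
        simp only [Finset.mem_filter, List.mem_toFinset] at hy
        obtain ⟨hm, _⟩ := hy
        rw [hv y]
        rw [show ((mPerm (x :: t) : ℕ) : ℤ) * (((x :: t).count y : ℕ) : ℤ)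
            = ((mPerm (x :: t) * (x :: t).count y : ℕ) : ℤ) by push_cast; ring]
        exact fd_exact (List.length_pos_of_mem hm) (keyB hm)
    -- the p update computes the arrangement count of the remaining letters
    have hp : PySem.Int.floordiv ((mPerm (x :: t) : ℤ) * cd.getD x 0) (((x :: t).length : ℕ) : ℤ)
        = ((mPerm t : ℕ) : ℤ) := by
      rw [hv x]
      rw [show ((mPerm (x :: t) : ℕ) : ℤ) * (((x :: t).count x : ℕ) : ℤ)
          = ((mPerm (x :: t) * (x :: t).count x : ℕ) : ℤ) by push_cast; ring]
      have h := keyB hxm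
      rw [List.erase_cons_head] at h
      exact fd_exact (List.length_pos_of_mem hxm) h
    -- invariants for the recursive call
    have hnd' : (cd.modify x 0 (· - 1)).keys.Nodup := by
      rw [PySem.Dict.keys_modify]
      exact PySem.Dict.nodup_keys_insert _ _ _ hnd
    have hv' : ∀ y, (cd.modify x 0 (· - 1)).getD y 0 = (t.count y : ℤ) := by
      intro y
      rw [PySem.Dict.getD_modify]
      by_cases hy : y = x
      · subst hy
        rw [if_pos rfl, hv y]
        push_cast [List.count_cons_self]
        ring
      · rw [if_neg hy, hv y]
        have : x ≠ y := fun he => hy he.symm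
        simp [this]
    have hcov' : ∀ y ∈ t, y ∈ (cd.modify x 0 (· - 1)).keys := by
      intro y hy
      rw [PySem.Dict.keys_modify]
      rw [PySem.Dict.mem_keys_insert]
      exact Or.inr (hcov y (List.mem_cons_of_mem x hy))
    have hrem : (((t.length + 1 : ℕ) : ℕ) : ℤ) - 1 = (t.length : ℤ) := by
      push_cast; ring
    have := ih (r + ∑ y ∈ (x :: t).toFinset.filter (fun y => y < x), (mPerm ((x :: t).erase y) : ℤ))
      (cd.modify x 0 (· - 1)) hnd' hv' hcov'
    simp only at this ⊢
    rw [hLen] at *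
    rw [hin, hp, hrem, this]
    show _ = r + gRank (x :: t) - 1
    rw [gRank]
    ring

theorem mPerm_nil : mPerm ([] : List Char) = 1 := by
  have := mSpec ([] : List Char)
  simpa [mDen] using this

theorem alt_eq_gRank (word : String) : istPosition_alt word = gRank word.toList := by
  unfold istPosition_alt
  dsimp only
  have hnd := PySem.Dict.nodup_keys_counter word.toList
  have hv := fun y => PySem.Dict.getD_counter word.toList y
  have hcov : ∀ y ∈ word.toList, y ∈ (PySem.Dict.counter word.toList).keys := fun y hy => by
    rw [PySem.Dict.keys_counter]
    exact (PySem.Set.mem_ofList _ y).mpr hy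
  have hdenom := denom_eq (PySem.Dict.counter word.toList) word.toList hnd hv hcov
  have hp : PySem.Int.floordiv (pyFactorial (word.toList.length : ℤ)) ((mDen word.toList : ℕ) : ℤ)
      = ((mPerm word.toList : ℕ) : ℤ) :=
    (pyFactorial_natCast word.toList.length) ▸ fd_exact (mDen_pos _) (mSpec _)
  rw [hdenom, hp, B_loop word.toList 1 (PySem.Dict.counter word.toList) hnd hv hcov]
  ring

theorem A_loop (rest : List Char) : ∀ (t : List Char) (c : PySem.Dict Char Int) (cs : List Char),
    cs.reverse = t.reverse ++ rest →
    c.keys.Nodup → (∀ y, c.getD y 0 = (t.count y : ℤ)) → (∀ y, y ∈ c.keys ↔ y ∈ t) →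
    ((PySem.List.pyRange (t.length : ℤ) (cs.length : ℤ)).foldl
      (fun (st : Int × Int × PySem.Dict Char Int) i =>
        let r := st.1; let s := st.2.1; let c := st.2.2
        match PySem.List.pyGet? cs (((cs.length : ℤ) - 1) - i) with
        | none => (r, s, c)
        | some x =>
          let c := c.modify x 0 (· + 1)
          let r := c.keys.foldl
            (fun r y => if y < x then r + PySem.Int.floordiv (s * c.getD y 0) (c.getD x 0) else r) r
          let s := PySem.Int.floordiv (s * (i + 1)) (c.getD x 0)
          (r, s, c))
      (gRank t, (mPerm t : ℤ), c)).1 = gRank (rest.reverse ++ t) := by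
  induction rest with
  | nil =>
    intro t c cs h _ _ _
    have hlen : t.length = cs.length := by
      have := congrArg List.length h
      simpa using this.symm
    rw [hlen]
    simp [PySem.List.pyRange]
  | cons ch rest' ih =>
    intro t c cs h hnd hv hiff
    have hlen : cs.length = t.length + (rest'.length + 1) := by
      have := congrArg List.length h
      simp at this
      omega
    have hklt : t.length < cs.length := by omega
    rw [PySem.List.pyRange_one_cons (by exact_mod_cast hklt), List.foldl_cons]
    -- the indexed character is ch
    have hget : PySem.List.pyGet? cs (((cs.length : ℤ) - 1) - (t.length : ℤ)) = some ch := by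
      have hj : ((cs.length : ℤ) - 1) - (t.length : ℤ) = ((cs.length - 1 - t.length : ℕ) : ℤ) := by
        push_cast [Nat.cast_sub (by omega : t.length ≤ cs.length - 1)]
        omega
      rw [hj, PySem.List.pyGet?_ofNat cs _ (by omega)]
      congr 1
      have h1 : cs[cs.length - 1 - t.length]'(by omega) = cs.reverse[t.length]'(by simpa using hklt) := by
        rw [List.getElem_reverse]
      rw [h1, List.getElem_of_eq h, List.getElem_append_right (by simp)]
      simp
    -- counter invariants after c[ch] += 1
    have hv' : ∀ z, (c.modify ch 0 (· + 1)).getD z 0 = ((ch :: t).count z : ℤ) := by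
      intro z
      rw [PySem.Dict.getD_modify]
      by_cases hz : z = ch
      · subst hz
        rw [if_pos rfl, hv z]
        push_cast [List.count_cons_self]
        ring
      · rw [if_neg hz, hv z]
        have : ch ≠ z := fun he => hz he.symm
        simp [this]
    have hiff' : ∀ z, z ∈ (c.modify ch 0 (· + 1)).keys ↔ z ∈ ch :: t := by
      intro z
      rw [PySem.Dict.keys_modify]
      by_cases hcont : c.contains ch = true
      · rw [PySem.Dict.keys_insert_of_contains _ _ hcont]
        have hcht : ch ∈ t := (hiff ch).mp ((PySem.Dict.contains_iff_mem_keys _ _).mp hcont)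
        rw [hiff z, List.mem_cons]
        constructor
        · exact fun hz => Or.inr hz
        · rintro (rfl | hz)
          · exact hcht
          · exact hz
      · rw [PySem.Dict.keys_insert_of_not_contains _ _ (Bool.eq_false_iff.mpr hcont)]
        rw [List.mem_append, List.mem_cons, hiff z]
        simp [or_comm]
    have hnd' : (c.modify ch 0 (· + 1)).keys.Nodup := by
      rw [PySem.Dict.keys_modify]
      exact PySem.Dict.nodup_keys_insert _ _ _ hnd
    have hcnt1 : (ch :: t).count ch = t.count ch + 1 := by simp
    -- the inner loop computes gRank (ch :: t)
    have hr' : (c.modify ch 0 (· + 1)).keys.foldl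
        (fun r y => if y < ch then
            r + PySem.Int.floordiv ((mPerm t : ℤ) * (c.modify ch 0 (· + 1)).getD y 0)
              ((c.modify ch 0 (· + 1)).getD ch 0)
          else r) (gRank t) = gRank (ch :: t) := by
      rw [foldl_ite_sum hnd' (fun y => y < ch)
        (fun y => PySem.Int.floordiv ((mPerm t : ℤ) * (c.modify ch 0 (· + 1)).getD y 0)
          ((c.modify ch 0 (· + 1)).getD ch 0)) (gRank t)]
      rw [gRank]
      have hsets : (c.modify ch 0 (· + 1)).keys.toFinset.filter (fun y => y < ch)
          = (ch :: t).toFinset.filter (fun y => y < ch) := by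
        apply Finset.ext
        intro z
        simp only [Finset.mem_filter, List.mem_toFinset, hiff' z]
      rw [hsets]
      rw [Finset.sum_congr rfl (fun y hy => ?_), add_comm]
      simp only [Finset.mem_filter, List.mem_toFinset] at hy
      obtain ⟨hyu, hylt⟩ := hy
      have hne : ch ≠ y := (ne_of_lt hylt).symm
      have hyt : y ∈ t := by
        rcases List.mem_cons.mp hyu with rfl | hz
        · exact absurd hylt (lt_irrefl _)
        · exact hz
      rw [hv' y, hv' ch, hcnt1]
      have hcy : (ch :: t).count y = t.count y := by
        simp [hne]
      rw [hcy]
      have hcast : ((mPerm t : ℕ) : ℤ) * ((t.count y : ℕ) : ℤ) = ((mPerm t * t.count y : ℕ) : ℤ) := by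
        push_cast; ring
      rw [hcast]
      rw [fd_exact (Nat.succ_pos _) ((key_replace hyt hne).trans (mul_comm _ _))]
      congr 2
      rw [List.erase_cons_tail (by simp [hne])]
    -- the s update computes mPerm (ch :: t)
    have hs' : PySem.Int.floordiv ((mPerm t : ℤ) * ((t.length : ℤ) + 1))
        ((c.modify ch 0 (· + 1)).getD ch 0) = ((mPerm (ch :: t) : ℕ) : ℤ) := by
      rw [hv' ch, hcnt1]
      rw [show ((mPerm t : ℕ) : ℤ) * ((t.length : ℤ) + 1) = ((mPerm t * (t.length + 1) : ℕ) : ℤ) by push_cast; ring]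
      rw [fd_exact (Nat.succ_pos _) ((key_cons ch t).trans (mul_comm _ _))]
    -- take the step and recurse
    simp only [hget, hr', hs']
    have harg : ((t.length : ℤ) + 1) = (((ch :: t).length : ℕ) : ℤ) := by
      push_cast [List.length_cons]
      ring
    rw [harg]
    rw [ih (ch :: t) (c.modify ch 0 (· + 1)) cs (by rw [h]; simp) hnd' hv' hiff']
    simp


theorem a_eq_gRank (word : String) : istPosition word = gRank word.toList := by
  unfold istPosition
  have := A_loop word.toList.reverse [] PySem.Dict.empty word.toList (by simp)
    PySem.Dict.nodup_keys_empty
    (fun y => by simp [PySem.Dict.getD_empty])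
    (fun y => by simp [PySem.Dict.keys_empty])
  simp only [gRank, mPerm_nil, List.reverse_reverse, List.append_nil, List.length_nil,
    Nat.cast_zero, Nat.cast_one] at this
  exact this


-- ===== VERDICT (by name: the statement is the Claim_ definition above) =====
theorem istPosition_spec : Claim_equal_istPosition := by
  intro word _
  unfold Spec_istPosition
  rw [a_eq_gRank, alt_eq_gRank]
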